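-- pv_equiv track=rewrite | github.com/alexandraback/datacollection | solutions_5670465267826688_1/Python/varkor/Q_C.py | quaternionMultiply
-- ===== SOURCE A (Python) =====
-- def reduce (string):
-- 	restring = string
-- 	for combo in ["ijk", "jki", "kij"]:
-- 		restring = restring.replace(combo, "-")
-- 	for combo in ["kji", "jik", "ikj"]:
-- 		restring = restring.replace(combo, "")
-- 	for combo in [x * 2 for x in ["i", "j", "k"]]:
-- 		restring = restring.replace(combo, "-")
-- 	restring = restring.replace("ij", "k").replace("jk", "i").replace("ki", "j");
-- 	restring = restring.replace("ji", "-k").replace("kj", "-i").replace("ik", "-j");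
-- 	neg = restring.count("-") % 2 != 0
-- 	restring = restring.replace("-", "")
-- 	return (restring != string, restring, neg)
--
-- def reducem (string):
-- 	neg = False
-- 	if len(string) > 1:
-- 		while True:
-- 			red = reduce(string)
-- 			if red[2]:
-- 					neg = not neg
-- 			if red[0]:
-- 				string = red[1]
-- 			else:
-- 				break
-- 	return (string, neg)
--
-- def quaternionMultiply (units):
-- 	value = 1
-- 	(units, neg) = reducem(units)
-- 	for unit in map(lambda x: 2 if x == "i" else (3 if x == "j" else 4), units):
-- 		if value == 1 or unit == 1:
-- 			value = unit
-- 		elif value == 2: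
-- 			value = -1 if unit == 2 else (4 if unit == 3 else -3)
-- 		elif value == 3:
-- 			value = -1 if unit == 3 else (2 if unit == 4 else -4)
-- 		elif value == 4:
-- 			value = -1 if unit == 4 else (3 if unit == 2 else -2)
-- 		if value < 0:
-- 			value = -value
-- 			neg = not neg
-- 	if neg:
-- 		value = -value
-- 	return value
-- ===== SOURCE B (Python) =====
-- def quaternionMultiply(units):
--     # one pass: multiply unit quaternions left-to-right; '-' negates, 'i'/'j' are i/j, anything else is k
--     sign, v = 1, 1
--     for c in units:
--         if c == "-":
--             sign = -sign
--         else: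
--             u = 2 if c == "i" else (3 if c == "j" else 4)
--             if v == 1:
--                 v = u
--             elif v == u:
--                 sign, v = -sign, 1
--             else:
--                 if (u - v) % 3 != 1:
--                     sign = -sign
--                 v = 9 - v - u
--     return sign * v
-- ===== Notes on version B (the rewrite author's own statement) =====
-- stated objective: faster
-- what changed: A repeatedly rewrites the string with up to 16 str.replace passes per round until a fixpoint before a final table loop; B is a single left-to-right fold that multiplies one quaternion unit per character (sign, axis) using the cyclic-axis formula, with no string rewriting.
-- intended difference: On the single input "-" A's len>1 guard skips the reduction so the lone '-' falls through the final loop as the unit k and A returns 4, while B treats '-' as a negation everywhere (as A itself does inside longer strings) and returns -1, the consistent intended value. — e.g. on quaternionMultiply("-"): A returns 4, B returns -1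
import Mathlib
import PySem

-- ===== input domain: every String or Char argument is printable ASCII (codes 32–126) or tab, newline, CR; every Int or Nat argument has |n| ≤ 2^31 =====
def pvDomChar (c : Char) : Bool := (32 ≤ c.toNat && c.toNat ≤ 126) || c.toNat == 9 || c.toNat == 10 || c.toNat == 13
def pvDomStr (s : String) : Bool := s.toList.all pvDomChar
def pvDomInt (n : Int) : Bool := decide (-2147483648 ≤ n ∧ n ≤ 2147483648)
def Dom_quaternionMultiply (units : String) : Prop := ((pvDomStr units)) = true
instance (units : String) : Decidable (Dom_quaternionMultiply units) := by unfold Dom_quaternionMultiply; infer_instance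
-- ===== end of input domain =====

-- B replaces A's repeated string-rewriting fixpoint with a single fold multiplying one quaternion unit per character.
-- Intended difference: on the single input "-" A returns 4 (its len>1 guard lets the lone '-' reach the final loop as k);
-- B returns -1, treating '-' as negation consistently (as A itself does inside longer strings).


-- ===== PORT A =====
-- reduce: one pass of string rewriting (15 replaces, then '-'-counting and removal)
def reduceA (string : String) : Bool × String × Bool :=
  let restring := string
  let restring := ["ijk", "jki", "kij"].foldl (fun r combo => PySem.Str.replace r combo "-") restring
  let restring := ["kji", "jik", "ikj"].foldl (fun r combo => PySem.Str.replace r combo "") restring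
  let restring := (["i", "j", "k"].map (fun x => x ++ x)).foldl (fun r combo => PySem.Str.replace r combo "-") restring
  let restring := PySem.Str.replace (PySem.Str.replace (PySem.Str.replace restring "ij" "k") "jk" "i") "ki" "j"
  let restring := PySem.Str.replace (PySem.Str.replace (PySem.Str.replace restring "ji" "-k") "kj" "-i") "ik" "-j"
  let neg := decide (PySem.Str.count restring "-" % 2 ≠ 0)
  let restring := PySem.Str.replace restring "-" ""
  (restring != string, restring, neg)

-- the 'while True' of reducem; the fuel (strictly more than a weighted measure that every
-- changing pass strictly decreases, see mC below) only makes the same loop total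
def reducemLoop : Nat → String → Bool → String × Bool
  | 0, s, neg => (s, neg)
  | fuel + 1, s, neg =>
    let red := reduceA s
    let neg' := if red.2.2 then !neg else neg
    if red.1 then reducemLoop fuel red.2.1 neg' else (s, neg')

def reducemA (string : String) : String × Bool :=
  if PySem.Str.len string > 1 then
    reducemLoop (2 * (PySem.Str.len string).toNat + 1) string false
  else (string, false)

-- body of A's final for-loop (including the map lambda and the value<0 normalisation)
def stepA (st : Int × Bool) (c : Char) : Int × Bool :=
  let unit : Int := if c = 'i' then 2 else if c = 'j' then 3 else 4
  let value := st.1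
  let value :=
    if value = 1 ∨ unit = 1 then unit
    else if value = 2 then (if unit = 2 then -1 else if unit = 3 then 4 else -3)
    else if value = 3 then (if unit = 3 then -1 else if unit = 4 then 2 else -4)
    else if value = 4 then (if unit = 4 then -1 else if unit = 2 then 3 else -2)
    else value
  if value < 0 then (-value, !st.2) else (value, st.2)

def quaternionMultiply (units : String) : Int :=
  let p := reducemA units
  let res := p.1.toList.foldl stepA (1, p.2)
  if res.2 then -res.1 else res.1

-- ===== PORT B =====
-- body of B's single fold: state (sign, axis code v ∈ {1,2,3,4})
def stepB (st : Int × Int) (c : Char) : Int × Int :=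
  if c = '-' then (-st.1, st.2)
  else
    let u : Int := if c = 'i' then 2 else if c = 'j' then 3 else 4
    let v := st.2
    if v = 1 then (st.1, u)
    else if v = u then (-st.1, 1)
    else
      let s := if PySem.Int.mod (u - v) 3 ≠ 1 then -st.1 else st.1
      (s, 9 - v - u)

def quaternionMultiply_alt (units : String) : Int :=
  let r := units.toList.foldl stepB (1, 1)
  r.1 * r.2

-- ===== PRECONDITION & SPEC =====
-- On the single input "-" A returns 4 (the len>1 guard lets the lone '-' reach the final loop, where it is
-- read as the unit k), while B returns -1: B treats '-' as a negation everywhere, exactly as A itself does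
-- inside longer strings, so B's value is the intended one.
def D_quaternionMultiply (units : String) : Prop := units = "-"
instance (units : String) : Decidable (D_quaternionMultiply units) := by unfold D_quaternionMultiply; infer_instance

def Spec_quaternionMultiply (units : String) (out : Int) : Prop := ¬ D_quaternionMultiply units → out = quaternionMultiply_alt units
instance (units : String) (out : Int) : Decidable (Spec_quaternionMultiply units out) := by unfold Spec_quaternionMultiply; infer_instance

def pvDiffWitness_quaternionMultiply : String := "-"
def pvDiffWitnessOut_quaternionMultiply : Int × Int := (4, -1)

-- ===== CLAIM (what is proved, stated in full; the proofs are below) =====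
def Claim_unchanged_quaternionMultiply : Prop := ∀ (units : String), Dom_quaternionMultiply units → Spec_quaternionMultiply units (quaternionMultiply units)
def Claim_changed_quaternionMultiply : Prop := Dom_quaternionMultiply (pvDiffWitness_quaternionMultiply) ∧ D_quaternionMultiply (pvDiffWitness_quaternionMultiply) ∧ quaternionMultiply (pvDiffWitness_quaternionMultiply) = pvDiffWitnessOut_quaternionMultiply.1 ∧ quaternionMultiply_alt (pvDiffWitness_quaternionMultiply) = pvDiffWitnessOut_quaternionMultiply.2 ∧ pvDiffWitnessOut_quaternionMultiply.1 ≠ pvDiffWitnessOut_quaternionMultiply.2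
def Claim_exact_quaternionMultiply : Prop := ∀ (units : String), Dom_quaternionMultiply units → D_quaternionMultiply units → quaternionMultiply units ≠ quaternionMultiply_alt units

-- ===== LEMMAS AND PROOFS =====

-- The quaternion group {±1, ±i, ±j, ±k} as (sign, axis) with axis 0,1,2,3 = 1,i,j,k
def axMul (v w : Fin 4) : Bool × Fin 4 :=
  if v.val = 0 then (false, w)
  else if w.val = 0 then (false, v)
  else if v = w then (true, 0)
  else (decide ((w.val + 3 - v.val) % 3 = 2), ⟨(6 - v.val - w.val) % 4, Nat.mod_lt _ (by norm_num)⟩)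

def qmul (a b : Bool × Fin 4) : Bool × Fin 4 :=
  let p := axMul a.2 b.2
  (xor (xor a.1 b.1) p.1, p.2)

def sgn (b : Bool) : Bool × Fin 4 := (b, 0)

def phi (c : Char) : Bool × Fin 4 :=
  if c = 'i' then (false, 1) else if c = 'j' then (false, 2) else if c = '-' then (true, 0) else (false, 3)

-- A's final loop reads every non-i/j character, '-' included, as k
def phiA (c : Char) : Bool × Fin 4 :=
  if c = 'i' then (false, 1) else if c = 'j' then (false, 2) else (false, 3)

def qlift (cs : List Char) : Bool × Fin 4 := cs.foldl (fun a c => qmul a (phi c)) (false, 0)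
def qliftA (cs : List Char) : Bool × Fin 4 := cs.foldl (fun a c => qmul a (phiA c)) (false, 0)

def encodeQ (q : Bool × Fin 4) : Int := if q.1 then -((q.2.val : Int) + 1) else (q.2.val : Int) + 1

theorem qmul_assoc : ∀ a b c : Bool × Fin 4, qmul (qmul a b) c = qmul a (qmul b c) := by decide
theorem qmul_one : ∀ a : Bool × Fin 4, qmul (false, 0) a = a := by decide
theorem qmul_one_right : ∀ a : Bool × Fin 4, qmul a (false, 0) = a := by decide

theorem foldl_qmul (f : Char → Bool × Fin 4) (cs : List Char) (q : Bool × Fin 4) :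
    cs.foldl (fun a c => qmul a (f c)) q = qmul q (cs.foldl (fun a c => qmul a (f c)) (false, 0)) := by
  induction cs generalizing q with
  | nil => simp [List.foldl, qmul_one_right]
  | cons c t ih =>
    simp only [List.foldl]
    rw [ih (qmul q (f c)), ih (qmul (false, 0) (f c)), qmul_one, qmul_assoc]

theorem qlift_append (a b : List Char) : qlift (a ++ b) = qmul (qlift a) (qlift b) := by
  simp only [qlift, List.foldl_append]; rw [foldl_qmul]

theorem qlift_cons (c : Char) (t : List Char) : qlift (c :: t) = qmul (phi c) (qlift t) := by
  simp only [qlift, List.foldl]; rw [foldl_qmul, qmul_one]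

theorem qlift_nil : qlift [] = (false, 0) := rfl

-- replace preserves the lifted product when pattern and replacement lift equally
theorem qlift_replace_go (old new : List Char) (h : qlift old = qlift new) :
    ∀ (fuel : Nat) (l acc : List Char),
      qlift (PySem.Chars.replace.go old new fuel l acc) = qmul (qlift acc.reverse) (qlift l) := by
  intro fuel
  induction fuel with
  | zero => intro l acc; rw [PySem.Chars.replace.go.eq_1]; exact qlift_append _ _
  | succ n ih =>
    intro l acc
    match l with
    | [] =>
      rw [PySem.Chars.replace.go.eq_2 _ _ _ _ (by omega)]
      rw [qlift_nil, qmul_one_right]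
    | c :: t =>
      rw [PySem.Chars.replace.go.eq_3]
      by_cases hp : old.isPrefixOf (c :: t) = true
      · simp only [hp, if_true]
        obtain ⟨t', ht'⟩ := (List.isPrefixOf_iff_prefix.mp hp)
        have hdrop : List.drop old.length (c :: t) = t' := by rw [← ht', List.drop_left]
        rw [ih, hdrop, ← ht']
        have : (new.reverse ++ acc).reverse = acc.reverse ++ new := by simp
        rw [this, qlift_append, qlift_append, ← h, qmul_assoc]
      · simp only [hp, Bool.false_eq_true, if_false]
        rw [ih]
        have : (c :: acc).reverse = acc.reverse ++ [c] := by simp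
        rw [this, qlift_append]
        have hc : qlift [c] = phi c := by rw [show [c] = c :: [] from rfl, qlift_cons, qlift_nil, qmul_one_right]
        rw [hc, qlift_cons, qmul_assoc]

theorem qlift_replace (old new : List Char) (hne : old ≠ []) (h : qlift old = qlift new)
    (s : List Char) : qlift (PySem.Chars.replace s old new) = qlift s := by
  unfold PySem.Chars.replace
  simp only [List.isEmpty_iff, hne, if_false]
  rw [qlift_replace_go old new h, List.reverse_nil, qlift_nil, qmul_one]

-- string-level version used on each of reduce's 15 rewrites
theorem qlift_replaceS (o n r : String) (hne : o.toList ≠ []) (h : qlift o.toList = qlift n.toList) :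
    qlift (PySem.Str.replace r o n).toList = qlift r.toList := by
  rw [PySem.Str.toList_replace]; exact qlift_replace _ _ hne h _

-- single-char pattern: replace = filter, count = List.count
theorem replace_dash_go : ∀ (fuel : Nat) (l acc : List Char), l.length ≤ fuel →
    PySem.Chars.replace.go ['-'] [] fuel l acc = acc.reverse ++ l.filter (· ≠ '-') := by
  intro fuel
  induction fuel with
  | zero =>
    intro l acc hl
    have : l = [] := List.length_eq_zero_iff.mp (Nat.le_zero.mp hl)
    subst this; rw [PySem.Chars.replace.go.eq_1]; simp
  | succ n ih =>
    intro l acc hl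
    match l with
    | [] => rw [PySem.Chars.replace.go.eq_2 _ _ _ _ (by omega)]; simp
    | c :: t =>
      rw [PySem.Chars.replace.go.eq_3]
      by_cases hc : c = '-'
      · subst hc
        have hp : (['-'] : List Char).isPrefixOf ('-' :: t) = true := by simp [List.isPrefixOf]
        simp only [hp, if_true]
        have hdrop : List.drop (['-'] : List Char).length ('-' :: t) = t := rfl
        rw [hdrop, ih t _ (by simp at hl; omega)]
        simp
      · have hp : (['-'] : List Char).isPrefixOf (c :: t) = false := by
          simp [List.isPrefixOf]; exact fun h => absurd h.symm hc
        simp only [hp, Bool.false_eq_true, if_false]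
        rw [ih t _ (by simp at hl; omega)]
        simp [hc]

theorem replace_dash (s : List Char) :
    PySem.Chars.replace s ['-'] [] = s.filter (· ≠ '-') := by
  unfold PySem.Chars.replace
  rw [if_neg (by decide), replace_dash_go s.length s [] le_rfl]
  simp

theorem count_dash_go : ∀ (fuel : Nat) (l : List Char) (acc : Nat), l.length ≤ fuel →
    PySem.Chars.count.go ['-'] fuel l acc = acc + l.count '-' := by
  intro fuel
  induction fuel with
  | zero =>
    intro l acc hl
    have : l = [] := List.length_eq_zero_iff.mp (Nat.le_zero.mp hl)
    subst this; rw [PySem.Chars.count.go.eq_1]; simp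
  | succ n ih =>
    intro l acc hl
    match l with
    | [] => rw [PySem.Chars.count.go.eq_2 _ _ _ (by omega)]; simp
    | c :: t =>
      rw [PySem.Chars.count.go.eq_3]
      by_cases hc : c = '-'
      · subst hc
        have hp : (['-'] : List Char).isPrefixOf ('-' :: t) = true := by simp [List.isPrefixOf]
        simp only [hp, if_true]
        have hdrop : List.drop (['-'] : List Char).length ('-' :: t) = t := rfl
        rw [hdrop, ih t _ (by simp at hl; omega)]
        simp [List.count_cons]; omega
      · have hp : (['-'] : List Char).isPrefixOf (c :: t) = false := by
          simp [List.isPrefixOf]; exact fun h => absurd h.symm hc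
        simp only [hp, Bool.false_eq_true, if_false]
        rw [ih t _ (by simp at hl; omega)]
        simp [List.count_cons, hc]

theorem count_dash (s : List Char) : PySem.Chars.count s ['-'] = s.count '-' := by
  unfold PySem.Chars.count
  rw [if_neg (by decide), count_dash_go s.length s 0 le_rfl]
  omega

theorem qmul_sgn_swap : ∀ (b : Bool) (a x : Bool × Fin 4),
    qmul a (qmul (sgn b) x) = qmul (sgn b) (qmul a x) := by decide

theorem qmul_negone : ∀ (b : Bool) (x : Bool × Fin 4),
    qmul (true, 0) (qmul (sgn b) x) = qmul (sgn (!b)) x := by decide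

theorem qlift_filter_dash (s : List Char) :
    qlift s = qmul (sgn (s.count '-' % 2 == 1)) (qlift (s.filter (· ≠ '-'))) := by
  induction s with
  | nil => simp [List.count_nil, qlift_nil]; decide
  | cons c t ih =>
    by_cases hc : c = '-'
    · subst hc
      rw [qlift_cons, ih]
      have hfil : ('-' :: t).filter (· ≠ '-') = t.filter (· ≠ '-') := by simp
      have hcnt : ('-' :: t).count '-' = t.count '-' + 1 := by simp [List.count_cons]
      rw [hfil, hcnt]
      have hphi : phi '-' = (true, 0) := by decide
      rw [hphi, qmul_negone]
      congr 1
      rcases Nat.mod_two_eq_zero_or_one (t.count '-') with h | h <;>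
        simp [Nat.add_mod, h, sgn]
    · rw [qlift_cons, ih]
      have hfil : (c :: t).filter (· ≠ '-') = c :: t.filter (· ≠ '-') := by simp [hc]
      have hcnt : (c :: t).count '-' = t.count '-' := by simp [List.count_cons, hc]
      rw [hfil, hcnt, qlift_cons, qmul_sgn_swap]

-- weighted measure: every replacement pass of reduce strictly decreases it (or changes nothing)
def wC (c : Char) : Nat := if c = 'i' ∨ c = 'j' ∨ c = 'k' then 2 else 1
def mC (cs : List Char) : Nat := (cs.map wC).sum

theorem mC_append (a b : List Char) : mC (a ++ b) = mC a + mC b := by simp [mC]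

theorem mC_replace_go (old new : List Char) (h : mC new < mC old) :
    ∀ (fuel : Nat) (l acc : List Char),
      PySem.Chars.replace.go old new fuel l acc = acc.reverse ++ l ∨
      mC (PySem.Chars.replace.go old new fuel l acc) < mC acc.reverse + mC l := by
  intro fuel
  induction fuel with
  | zero => intro l acc; left; rw [PySem.Chars.replace.go.eq_1]
  | succ n ih =>
    intro l acc
    match l with
    | [] =>
      left; rw [PySem.Chars.replace.go.eq_2 _ _ _ _ (by omega)]; simp
    | c :: t =>
      rw [PySem.Chars.replace.go.eq_3]
      by_cases hp : old.isPrefixOf (c :: t) = true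
      · simp only [hp, if_true]
        right
        obtain ⟨t', ht'⟩ := (List.isPrefixOf_iff_prefix.mp hp)
        have hdrop : List.drop old.length (c :: t) = t' := by rw [← ht', List.drop_left]
        rw [hdrop]
        have hrev : (new.reverse ++ acc).reverse = acc.reverse ++ new := by simp
        have hl : mC (c :: t) = mC old + mC t' := by rw [← ht', mC_append]
        rcases ih t' (new.reverse ++ acc) with h' | h'
        · rw [h', hrev, List.append_assoc, mC_append, mC_append]; omega
        · rw [hrev, mC_append] at h'; omega
      · simp only [hp, Bool.false_eq_true, if_false]
        have hmc : mC (c :: t) = wC c + mC t := by simp [mC]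
        rcases ih t (c :: acc) with h' | h'
        · left; rw [h']; simp
        · right
          have hrev : mC (c :: acc).reverse = mC acc.reverse + wC c := by
            simp [mC, List.map_reverse, Nat.add_comm]
          rw [hrev] at h'; omega

theorem mC_replace (old new : List Char) (h : mC new < mC old) (s : List Char) :
    PySem.Chars.replace s old new = s ∨ mC (PySem.Chars.replace s old new) < mC s := by
  have hne : old ≠ [] := by intro he; subst he; simp [mC] at h
  unfold PySem.Chars.replace
  simp only [List.isEmpty_iff, hne, if_false]
  rcases mC_replace_go old new h s.length s [] with h' | h'
  · left; simpa using h'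
  · right; simpa [mC] using h'

theorem mC_replaceS (o n r : String) (h : mC n.toList < mC o.toList) :
    (PySem.Str.replace r o n).toList = r.toList ∨ mC (PySem.Str.replace r o n).toList < mC r.toList := by
  rw [PySem.Str.toList_replace]; exact mC_replace _ _ h _

theorem mC_chain {a b c : List Char} (h1 : a = b ∨ mC a < mC b) (h2 : b = c ∨ mC b < mC c) :
    a = c ∨ mC a < mC c := by
  rcases h1 with h1 | h1 <;> rcases h2 with h2 | h2
  · left; rw [h1, h2]
  · right; rw [h1]; exact h2
  · right; rw [← h2]; exact h1
  · right; omega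

-- one pass of reduce, named pieces
def red9 (s : String) : String :=
  PySem.Str.replace (PySem.Str.replace (PySem.Str.replace
    (PySem.Str.replace (PySem.Str.replace (PySem.Str.replace
      (PySem.Str.replace (PySem.Str.replace (PySem.Str.replace
        (PySem.Str.replace (PySem.Str.replace (PySem.Str.replace
          (PySem.Str.replace (PySem.Str.replace (PySem.Str.replace s
            "ijk" "-") "jki" "-") "kij" "-")
          "kji" "") "jik" "") "ikj" "")
        ("i" ++ "i") "-") ("j" ++ "j") "-") ("k" ++ "k") "-")
      "ij" "k") "jk" "i") "ki" "j")
    "ji" "-k") "kj" "-i") "ik" "-j"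

set_option maxRecDepth 8192 in
theorem reduceA_eq (s : String) :
    reduceA s = ((PySem.Str.replace (red9 s) "-" "" != s),
      PySem.Str.replace (red9 s) "-" "",
      decide (PySem.Str.count (red9 s) "-" % 2 ≠ 0)) := by
  unfold reduceA red9
  simp only [List.foldl, List.map]
  rfl

theorem qlift_red9 (s : String) : qlift (red9 s).toList = qlift s.toList := by
  unfold red9
  rw [qlift_replaceS _ _ _ (by decide) (by decide)]
  rw [qlift_replaceS _ _ _ (by decide) (by decide)]
  rw [qlift_replaceS _ _ _ (by decide) (by decide)]
  rw [qlift_replaceS _ _ _ (by decide) (by decide)]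
  rw [qlift_replaceS _ _ _ (by decide) (by decide)]
  rw [qlift_replaceS _ _ _ (by decide) (by decide)]
  rw [qlift_replaceS _ _ _ (by decide) (by decide)]
  rw [qlift_replaceS _ _ _ (by decide) (by decide)]
  rw [qlift_replaceS _ _ _ (by decide) (by decide)]
  rw [qlift_replaceS _ _ _ (by decide) (by decide)]
  rw [qlift_replaceS _ _ _ (by decide) (by decide)]
  rw [qlift_replaceS _ _ _ (by decide) (by decide)]
  rw [qlift_replaceS _ _ _ (by decide) (by decide)]
  rw [qlift_replaceS _ _ _ (by decide) (by decide)]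
  rw [qlift_replaceS _ _ _ (by decide) (by decide)]

theorem mC_red9 (s : String) :
    (red9 s).toList = s.toList ∨ mC (red9 s).toList < mC s.toList := by
  unfold red9
  have h1 := mC_replaceS "ijk" "-" s (by decide)
  have h2 := mC_chain (mC_replaceS "jki" "-" _ (by decide)) h1
  have h3 := mC_chain (mC_replaceS "kij" "-" _ (by decide)) h2
  have h4 := mC_chain (mC_replaceS "kji" "" _ (by decide)) h3
  have h5 := mC_chain (mC_replaceS "jik" "" _ (by decide)) h4
  have h6 := mC_chain (mC_replaceS "ikj" "" _ (by decide)) h5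
  have h7 := mC_chain (mC_replaceS ("i" ++ "i") "-" _ (by decide)) h6
  have h8 := mC_chain (mC_replaceS ("j" ++ "j") "-" _ (by decide)) h7
  have h9 := mC_chain (mC_replaceS ("k" ++ "k") "-" _ (by decide)) h8
  have h10 := mC_chain (mC_replaceS "ij" "k" _ (by decide)) h9
  have h11 := mC_chain (mC_replaceS "jk" "i" _ (by decide)) h10
  have h12 := mC_chain (mC_replaceS "ki" "j" _ (by decide)) h11
  have h13 := mC_chain (mC_replaceS "ji" "-k" _ (by decide)) h12
  have h14 := mC_chain (mC_replaceS "kj" "-i" _ (by decide)) h13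
  exact mC_chain (mC_replaceS "ik" "-j" _ (by decide)) h14

theorem toList_red9_dashfree (s : String) :
    ∀ c ∈ (PySem.Str.replace (red9 s) "-" "").toList, c ≠ '-' := by
  intro c hc
  rw [PySem.Str.toList_replace] at hc
  have : ("-" : String).toList = ['-'] := rfl
  rw [this, show ("" : String).toList = [] from rfl, replace_dash, List.mem_filter] at hc
  simpa using hc.2

-- one pass of reduce: sign-correct, result dash-free, unchanged => fixed, changed => smaller measure
theorem reduceA_spec (s : String) :
    qmul (sgn (reduceA s).2.2) (qlift (reduceA s).2.1.toList) = qlift s.toList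
    ∧ (∀ c ∈ (reduceA s).2.1.toList, c ≠ '-')
    ∧ ((reduceA s).1 = false → (reduceA s).2.1 = s)
    ∧ ((reduceA s).1 = true → mC (reduceA s).2.1.toList < mC s.toList) := by
  rw [reduceA_eq]
  refine ⟨?_, toList_red9_dashfree s, ?_, ?_⟩
  · -- sign invariant
    have hfil : (PySem.Str.replace (red9 s) "-" "").toList = (red9 s).toList.filter (· ≠ '-') := by
      rw [PySem.Str.toList_replace, show ("-" : String).toList = ['-'] from rfl,
        show ("" : String).toList = [] from rfl, replace_dash]
    have hcnt : PySem.Str.count (red9 s) "-" = (red9 s).toList.count '-' := by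
      rw [PySem.Str.count_eq, show ("-" : String).toList = ['-'] from rfl, count_dash]
    have hb : (decide (PySem.Str.count (red9 s) "-" % 2 ≠ 0)) = ((red9 s).toList.count '-' % 2 == 1) := by
      rw [hcnt]
      rcases Nat.mod_two_eq_zero_or_one ((red9 s).toList.count '-') with h | h <;> simp [h]
    simp only [hfil, hb]
    rw [← qlift_filter_dash, qlift_red9]
  · -- unchanged => fixed
    intro h
    simp only [bne_eq_false_iff_eq] at h
    exact h
  · -- changed => smaller measure
    intro h
    have hne : PySem.Str.replace (red9 s) "-" "" ≠ s := by
      intro he; rw [he] at h; simp at h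
    have hstep : (PySem.Str.replace (red9 s) "-" "").toList = (red9 s).toList ∨
        mC (PySem.Str.replace (red9 s) "-" "").toList < mC (red9 s).toList :=
      mC_replaceS "-" "" _ (by decide)
    rcases mC_chain hstep (mC_red9 s) with he | hlt
    · exact absurd (String.toList_inj.mp he) hne
    · exact hlt

-- the sign element commutes into the loop accumulator
theorem sgn_if : ∀ (b1 b2 : Bool) (x : Bool × Fin 4),
    qmul (sgn (if b1 then !b2 else b2)) x = qmul (sgn b2) (qmul (sgn b1) x) := by decide

theorem mC_le (cs : List Char) : mC cs ≤ 2 * cs.length := by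
  induction cs with
  | nil => simp [mC]
  | cons c t ih => simp only [mC, List.map, List.sum_cons, List.length_cons] at *
                   have : wC c ≤ 2 := by unfold wC; split <;> omega
                   omega

-- the reducem while-loop: sign-correct and dash-free result, given enough fuel
theorem loop_spec : ∀ (fuel : Nat) (s : String) (neg : Bool), mC s.toList < fuel →
    qmul (sgn (reducemLoop fuel s neg).2) (qlift (reducemLoop fuel s neg).1.toList)
      = qmul (sgn neg) (qlift s.toList)
    ∧ (∀ c ∈ (reducemLoop fuel s neg).1.toList, c ≠ '-') := by
  intro fuel
  induction fuel with
  | zero => intro s neg h; exact absurd h (Nat.not_lt_zero _)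
  | succ n ih =>
    intro s neg h
    obtain ⟨hsgn, hdf, hfix, hlt⟩ := reduceA_spec s
    simp only [reducemLoop]
    by_cases hch : (reduceA s).1 = true
    · simp only [hch, if_true]
      have hm : mC (reduceA s).2.1.toList < n :=
        lt_of_lt_of_le (hlt hch) (Nat.lt_succ_iff.mp h)
      obtain ⟨ih1, ih2⟩ := ih (reduceA s).2.1 (if (reduceA s).2.2 then !neg else neg) hm
      refine ⟨?_, ih2⟩
      rw [ih1, sgn_if, hsgn]
    · simp only [Bool.not_eq_true] at hch
      simp only [hch, Bool.false_eq_true, if_false]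
      have hfx := hfix hch
      rw [hfx] at hsgn hdf
      exact ⟨by rw [sgn_if, hsgn], hdf⟩

-- relating the ports' loop states to the group elements
def toStA (q : Bool × Fin 4) (b : Bool) : Int × Bool := (((q.2.val : Int) + 1), xor b q.1)
def toStB (q : Bool × Fin 4) : Int × Int := ((if q.1 then -1 else 1), (q.2.val : Int) + 1)

theorem stepA_toStA : ∀ (c : Char) (q : Bool × Fin 4) (b : Bool),
    stepA (toStA q b) c = toStA (qmul q (phiA c)) b := by
  intro c q b
  by_cases hi : c = 'i'
  · subst hi; revert q b; decide
  by_cases hj : c = 'j'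
  · subst hj; revert q b; decide
  have h1 : stepA (toStA q b) c = stepA (toStA q b) 'k' := by simp [stepA, hi, hj]
  have h2 : phiA c = (false, 3) := by simp [phiA, hi, hj]
  rw [h1, h2]
  clear h1 h2 hi hj
  revert q b; decide

theorem foldA : ∀ (cs : List Char) (q : Bool × Fin 4) (b : Bool),
    cs.foldl stepA (toStA q b) = toStA (cs.foldl (fun a c => qmul a (phiA c)) q) b := by
  intro cs
  induction cs with
  | nil => intro q b; rfl
  | cons c t ih => intro q b; simp only [List.foldl]; rw [stepA_toStA, ih]

theorem stepB_toStB : ∀ (c : Char) (q : Bool × Fin 4),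
    stepB (toStB q) c = toStB (qmul q (phi c)) := by
  intro c q
  by_cases hi : c = 'i'
  · subst hi; revert q; decide
  by_cases hj : c = 'j'
  · subst hj; revert q; decide
  by_cases hm : c = '-'
  · subst hm; revert q; decide
  have h1 : stepB (toStB q) c = stepB (toStB q) 'k' := by simp [stepB, hi, hj, hm]
  have h2 : phi c = (false, 3) := by simp [phi, hi, hj, hm]
  rw [h1, h2]
  clear h1 h2 hi hj hm
  revert q; decide

theorem foldB : ∀ (cs : List Char) (q : Bool × Fin 4),
    cs.foldl stepB (toStB q) = toStB (cs.foldl (fun a c => qmul a (phi c)) q) := by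
  intro cs
  induction cs with
  | nil => intro q; rfl
  | cons c t ih => intro q; simp only [List.foldl]; rw [stepB_toStB, ih]

theorem B_eq (s : String) : quaternionMultiply_alt s = encodeQ (qlift s.toList) := by
  have h0 : ((1 : Int), (1 : Int)) = toStB (false, 0) := by decide
  have henc : ∀ q : Bool × Fin 4, (toStB q).1 * (toStB q).2 = encodeQ q := by decide
  simp only [quaternionMultiply_alt, qlift, h0, foldB, henc]

theorem finalA : ∀ (q : Bool × Fin 4) (b : Bool),
    (if (toStA q b).2 then -(toStA q b).1 else (toStA q b).1) = encodeQ (qmul (sgn b) q) := by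
  decide

theorem qliftA_cons (c : Char) (t : List Char) : qliftA (c :: t) = qmul (phiA c) (qliftA t) := by
  simp only [qliftA, List.foldl]; rw [foldl_qmul, qmul_one]

theorem phiA_eq_phi (c : Char) (h : c ≠ '-') : phiA c = phi c := by
  simp [phi, phiA, h]

theorem qliftA_eq_qlift : ∀ (cs : List Char), (∀ c ∈ cs, c ≠ '-') → qliftA cs = qlift cs := by
  intro cs
  induction cs with
  | nil => intro _; rfl
  | cons c t ih =>
    intro h
    rw [qliftA_cons, qlift_cons, ih (fun x hx => h x (List.mem_cons_of_mem _ hx)),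
      phiA_eq_phi c (h c List.mem_cons_self)]

theorem A_eq (s : String) (hs : s.toList ≠ ['-']) :
    quaternionMultiply s = encodeQ (qlift s.toList) := by
  have hstart : ∀ b : Bool, ((1 : Int), b) = toStA (false, 0) b := by decide
  simp only [quaternionMultiply, reducemA]
  by_cases hlen : PySem.Str.len s > 1
  · simp only [hlen, if_true]
    have hmlt : mC s.toList < 2 * (PySem.Str.len s).toNat + 1 := by
      have h1 : mC s.toList ≤ 2 * s.toList.length := mC_le _
      have h2 : PySem.Str.len s = (s.toList.length : Int) := PySem.Str.len_eq s
      omega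
    obtain ⟨hinv, hdf⟩ := loop_spec (2 * (PySem.Str.len s).toNat + 1) s false hmlt
    rw [hstart, foldA, finalA]
    have : (reducemLoop (2 * (PySem.Str.len s).toNat + 1) s false).1.toList.foldl
        (fun a c => qmul a (phiA c)) (false, 0)
        = qliftA (reducemLoop (2 * (PySem.Str.len s).toNat + 1) s false).1.toList := rfl
    rw [this, qliftA_eq_qlift _ hdf, hinv]
    have hone : ∀ x : Bool × Fin 4, qmul (sgn false) x = x := by decide
    rw [hone]
  · simp only [hlen, if_false]
    rw [hstart, foldA, finalA]
    have hdf : ∀ c ∈ s.toList, c ≠ '-' := by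
      have hl : s.toList.length ≤ 1 := by
        have h2 : PySem.Str.len s = (s.toList.length : Int) := PySem.Str.len_eq s
        omega
      match hsl : s.toList with
      | [] => intro c hc; simp at hc
      | [c] =>
        intro x hx
        rw [List.mem_singleton] at hx
        subst hx
        intro he; subst he
        exact hs hsl
      | c1 :: c2 :: t => rw [hsl] at hl; simp at hl
    have : s.toList.foldl (fun a c => qmul a (phiA c)) (false, 0) = qliftA s.toList := rfl
    rw [this, qliftA_eq_qlift _ hdf]
    have hone : ∀ x : Bool × Fin 4, qmul (sgn false) x = x := by decide
    rw [hone]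

-- ===== VERDICT (by name: the statement is the Claim_ definition above) =====
theorem quaternionMultiply_spec : Claim_unchanged_quaternionMultiply := by
  intro units _ hD
  have hne : units.toList ≠ ['-'] := fun h => hD (String.toList_inj.mp h)
  rw [A_eq units hne, B_eq units]
theorem quaternionMultiply_changed : Claim_changed_quaternionMultiply := by
  unfold Claim_changed_quaternionMultiply; decide
theorem quaternionMultiply_tight : Claim_exact_quaternionMultiply := by
  intro units _ hd
  rw [hd]
  decide
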